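-- pv_equiv track=rewrite | github.com/rowancallahan/speaky | transpiler.py | _process_empty
-- ===== SOURCE A (Python) =====
-- def _process_empty(text):
--     """Process 'empty X' → empty collection literal.
--
--     empty list       → []
--     empty dictionary → {}
--     empty dict       → {}
--     empty tuple      → ()
--     empty set        → set()
--     empty string     → ""
--     """
--     EMPTY_MAP = {
--         "empty list": "[]",
--         "empty dictionary": "{}",
--         "empty dict": "{}",
--         "empty tuple": "()",
--         "empty set": "set()",
--         "empty string": '""',
--     }
--     for spoken, python_val in EMPTY_MAP.items():
--         if spoken in text:
--             text = text.replace(spoken, python_val)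
--     return text
-- ===== SOURCE B (Python) =====
-- import re
--
-- _EMPTY_MAP = {
--     "empty list": "[]",
--     "empty dictionary": "{}",
--     "empty dict": "{}",
--     "empty tuple": "()",
--     "empty set": "set()",
--     "empty string": '""',
-- }
-- # One alternation in map order: "empty dictionary" precedes "empty dict",
-- # so the longer phrase wins at a shared position, like A's pass order.
-- _EMPTY_RE = re.compile("|".join(re.escape(k) for k in _EMPTY_MAP))
--
--
-- def _process_empty(text):
--     """Process 'empty X' → empty collection literal (single regex pass)."""
--     return _EMPTY_RE.sub(lambda m: _EMPTY_MAP[m.group(0)], text)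
-- ===== Notes on version B (the rewrite author's own statement) =====
-- stated objective: idiomatic
-- what changed: A runs six sequential full-text replace passes (one per map entry, each with its own containment scan); B compiles one alternation regex from the map keys (map order, so 'empty dictionary' precedes 'empty dict') and does a single left-to-right scan, dispatching each match through the dict.
-- outside the precondition, e.g. on _process_empty('empty tuplempty list'): A returns 'empty tupl[]', B returns '()mpty list'; on _process_empty('empty tuplempty dict'): A returns 'empty tupl{}', B returns '()mpty dict'
import Mathlib
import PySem

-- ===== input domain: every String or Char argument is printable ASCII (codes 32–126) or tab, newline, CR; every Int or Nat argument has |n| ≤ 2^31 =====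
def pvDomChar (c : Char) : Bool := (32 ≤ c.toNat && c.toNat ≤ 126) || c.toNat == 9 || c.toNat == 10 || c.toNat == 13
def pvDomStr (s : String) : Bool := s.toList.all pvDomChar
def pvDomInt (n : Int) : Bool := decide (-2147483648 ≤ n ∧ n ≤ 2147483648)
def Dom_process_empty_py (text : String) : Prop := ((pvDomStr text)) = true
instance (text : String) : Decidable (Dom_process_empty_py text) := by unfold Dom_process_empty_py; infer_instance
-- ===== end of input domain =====

-- B replaces A's six sequential full-text replace passes by ONE left-to-right scan (a single
-- compiled-regex substitution in Python, alternatives in map order); equivalence is about the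
-- return value on texts without overlapping 'empty …' phrases (see Pre_ below).

-- ===== PORT A =====
def pvEmptyMap : List (String × String) :=
  [("empty list", "[]"), ("empty dictionary", "{}"), ("empty dict", "{}"),
   ("empty tuple", "()"), ("empty set", "set()"), ("empty string", "\"\"")]

def process_empty_py (text : String) : String :=
  List.foldl
    (fun t kv => if PySem.Str.isIn kv.1 t then PySem.Str.replace t kv.1 kv.2 else t)
    text pvEmptyMap

-- ===== PORT B =====
-- the six alternation branches of B's compiled regex, in map order, and their replacements
def pvKL : List Char := ['e','m','p','t','y',' ','l','i','s','t']
def pvVL : List Char := ['[',']']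
def pvKDY : List Char := ['e','m','p','t','y',' ','d','i','c','t','i','o','n','a','r','y']
def pvVDY : List Char := ['{','}']
def pvKD : List Char := ['e','m','p','t','y',' ','d','i','c','t']
def pvVD : List Char := ['{','}']
def pvKT : List Char := ['e','m','p','t','y',' ','t','u','p','l','e']
def pvVT : List Char := ['(',')']
def pvKSE : List Char := ['e','m','p','t','y',' ','s','e','t']
def pvVSE : List Char := ['s','e','t','(',')']
def pvKST : List Char := ['e','m','p','t','y',' ','s','t','r','i','n','g']
def pvVST : List Char := ['"','"']

-- re.sub with the alternation: scan left to right, at each position try the alternatives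
-- in pattern order; on a match emit the replacement and continue after the match.
def pvScanB : List Char → List Char
  | [] => []
  | c :: t =>
    if pvKL <+: (c :: t) then pvVL ++ pvScanB (t.drop 9)
    else if pvKDY <+: (c :: t) then pvVDY ++ pvScanB (t.drop 15)
    else if pvKD <+: (c :: t) then pvVD ++ pvScanB (t.drop 9)
    else if pvKT <+: (c :: t) then pvVT ++ pvScanB (t.drop 10)
    else if pvKSE <+: (c :: t) then pvVSE ++ pvScanB (t.drop 8)
    else if pvKST <+: (c :: t) then pvVST ++ pvScanB (t.drop 11)
    else c :: pvScanB t
termination_by l => l.length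
decreasing_by all_goals simp

def process_empty_py_alt (text : String) : String := String.ofList (pvScanB text.toList)

-- ===== PRECONDITION & SPEC =====
-- Pre_ excludes texts containing overlapping phrases "empty tuplempty list"/"empty tuplempty dict"
-- (the final 'e' of "empty tuple" also starts the next phrase): there A's pass order replaces the
-- second phrase first while B's single scan takes the leftmost one — both corner values defensible.
def Pre_process_empty_py (text : String) : Prop :=
  PySem.Str.isIn "empty tuplempty list" text = false ∧
  PySem.Str.isIn "empty tuplempty dict" text = false
instance (text : String) : Decidable (Pre_process_empty_py text) := by
  unfold Pre_process_empty_py; infer_instance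

def pvWitness_process_empty_py : String := "give me an empty list, an empty dict and an empty set"

def Spec_process_empty_py (text : String) (out : String) : Prop := out = process_empty_py_alt text
instance (text : String) (out : String) : Decidable (Spec_process_empty_py text out) := by
  unfold Spec_process_empty_py; infer_instance

-- ===== CLAIM (what is proved, stated in full; the proofs are below) =====
def Claim_equal_process_empty_py : Prop := ∀ (text : String), Dom_process_empty_py text →
  Pre_process_empty_py text → Spec_process_empty_py text (process_empty_py text)

-- ===== LEMMAS AND PROOFS =====

-- clean recursive form of Python's str.replace (one pass, non-overlapping, left to right)
def pvRepl (k v : List Char) : List Char → List Char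
  | [] => []
  | c :: t =>
    if k <+: (c :: t) then v ++ pvRepl k v (t.drop (k.length - 1)) else c :: pvRepl k v t
termination_by l => l.length
decreasing_by all_goals simp

def pvBad1 : List Char :=
  ['e','m','p','t','y',' ','t','u','p','l','e','m','p','t','y',' ','l','i','s','t']
def pvBad2 : List Char :=
  ['e','m','p','t','y',' ','t','u','p','l','e','m','p','t','y',' ','d','i','c','t']

-- A's six passes, innermost first (map order)
def pvA6 (s : List Char) : List Char :=
  pvRepl pvKST pvVST (pvRepl pvKSE pvVSE (pvRepl pvKT pvVT
    (pvRepl pvKD pvVD (pvRepl pvKDY pvVDY (pvRepl pvKL pvVL s)))))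

lemma pvPrefixSplit {p u x : List Char} (h : p <+: u ++ x) : p <+: u ∨ u <+: p :=
  List.prefix_or_prefix_of_prefix h (List.prefix_append u x)

lemma pvRepl_cons {k v : List Char} {c : Char} {t : List Char} (h : ¬ k <+: (c :: t)) :
    pvRepl k v (c :: t) = c :: pvRepl k v t := by
  rw [pvRepl]; rw [if_neg h]

lemma pvRepl_match {k v : List Char} (x : List Char) (hk : k ≠ []) :
    pvRepl k v (k ++ x) = v ++ pvRepl k v x := by
  obtain ⟨a, k', rfl⟩ := List.exists_cons_of_ne_nil hk
  rw [List.cons_append, pvRepl]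
  rw [if_pos (by exact ⟨x, by simp⟩)]
  simp

lemma pvRepl_id {k v : List Char} : ∀ {t : List Char}, ¬ k <:+: t → pvRepl k v t = t := by
  intro t
  induction t with
  | nil => intro _; rw [pvRepl]
  | cons c t ih =>
    intro h
    rw [pvRepl_cons (fun hp => h hp.isInfix)]
    rw [ih (fun hi => h (hi.trans ((List.suffix_cons c t).isInfix)))]

-- a pattern that cannot interact with the replacement value stays a non-prefix through a pass
lemma pvRepl_pres (k v : List Char) : ∀ (n : Nat) (t p : List Char), t.length ≤ n →
    (∀ j, j < p.length → ¬ (p.drop j <+: v) ∧ ¬ (v <+: p.drop j)) →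
    ¬ p <+: t → ¬ p <+: pvRepl k v t := by
  intro n
  induction n with
  | zero =>
    intro t p hl _ hnp
    have : t = [] := List.eq_nil_of_length_eq_zero (Nat.le_zero.mp hl)
    subst this; rw [pvRepl]; exact hnp
  | succ n ih =>
    intro t p hl hv hnp
    have hpne : p ≠ [] := by rintro rfl; exact hnp (List.nil_prefix)
    cases t with
    | nil => rw [pvRepl]; exact hnp
    | cons c t' =>
      by_cases hm : k <+: (c :: t')
      · rw [pvRepl]; rw [if_pos hm]
        intro hcon
        rcases pvPrefixSplit hcon with h1 | h2
        · exact (hv 0 (by simpa [List.length_pos_iff] using hpne)).1 (by simpa using h1)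
        · exact (hv 0 (by simpa [List.length_pos_iff] using hpne)).2 (by simpa using h2)
      · rw [pvRepl_cons hm]
        obtain ⟨a, p', rfl⟩ := List.exists_cons_of_ne_nil hpne
        intro hcon
        rw [List.cons_prefix_cons] at hcon
        obtain ⟨rfl, hp'⟩ := hcon
        have hnp' : ¬ p' <+: t' := fun h => hnp (List.cons_prefix_cons.mpr ⟨rfl, h⟩)
        have hv' : ∀ j, j < p'.length → ¬ (p'.drop j <+: v) ∧ ¬ (v <+: p'.drop j) := by
          intro j hj
          have := hv (j + 1) (by simp; omega)
          simpa using this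
        exact ih t' p' (by simp at hl; omega) hv' hnp' hp'

-- a pass copies a block it can never match inside
lemma pvRepl_dist {k v : List Char} : ∀ (w x : List Char),
    (∀ j, j < w.length → ¬ k <+: (w.drop j ++ x)) →
    pvRepl k v (w ++ x) = w ++ pvRepl k v x := by
  intro w
  induction w with
  | nil => intro x _; simp
  | cons a w' ih =>
    intro x h
    rw [List.cons_append, pvRepl_cons (by have := h 0 (by simp); simpa using this)]
    rw [ih x (fun j hj => by have := h (j + 1) (by simp; omega); simpa using this)]
    simp

lemma pvNoMatch {k w : List Char}
    (h : ∀ j, j < w.length → ¬ (k <+: w.drop j) ∧ ¬ (w.drop j <+: k)) :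
    ∀ (x : List Char) (j : Nat), j < w.length → ¬ k <+: (w.drop j ++ x) := by
  intro x j hj hcon
  rcases pvPrefixSplit hcon with h1 | h2
  · exact (h j hj).1 h1
  · exact (h j hj).2 h2

lemma pvRepl_dist' {k v : List Char} (w x : List Char)
    (h : ∀ j, j < w.length → ¬ (k <+: w.drop j) ∧ ¬ (w.drop j <+: k)) :
    pvRepl k v (w ++ x) = w ++ pvRepl k v x :=
  pvRepl_dist w x (pvNoMatch h x)


lemma pvNPA {k w : List Char} (x : List Char) (h1 : ¬ k <+: w) (h2 : ¬ w <+: k) :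
    ¬ k <+: w ++ x :=
  fun h => (pvPrefixSplit h).elim h1 h2

-- pvScanB on each kind of input
lemma pvScanB_nil : pvScanB [] = [] := by rw [pvScanB]

lemma pvScanB_L (r : List Char) : pvScanB (pvKL ++ r) = pvVL ++ pvScanB r := by
  rw [show pvKL ++ r = 'e' :: (['m','p','t','y',' ','l','i','s','t'] ++ r) from rfl]
  rw [pvScanB]
  rw [if_pos (show (pvKL <+: 'e' :: (['m','p','t','y',' ','l','i','s','t'] ++ r)) from ⟨r, rfl⟩)]
  rw [show List.drop 9 (['m','p','t','y',' ','l','i','s','t'] ++ r) = r from List.drop_left' (by rfl)]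

lemma pvScanB_DY (r : List Char) : pvScanB (pvKDY ++ r) = pvVDY ++ pvScanB r := by
  rw [show pvKDY ++ r = 'e' :: (['m','p','t','y',' ','d','i','c','t','i','o','n','a','r','y'] ++ r) from rfl]
  rw [pvScanB]
  rw [if_neg (show (¬ pvKL <+: 'e' :: (['m','p','t','y',' ','d','i','c','t','i','o','n','a','r','y'] ++ r)) from pvNPA (k := pvKL) (w := pvKDY) r (by decide) (by decide))]
  rw [if_pos (show (pvKDY <+: 'e' :: (['m','p','t','y',' ','d','i','c','t','i','o','n','a','r','y'] ++ r)) from ⟨r, rfl⟩)]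
  rw [show List.drop 15 (['m','p','t','y',' ','d','i','c','t','i','o','n','a','r','y'] ++ r) = r from List.drop_left' (by rfl)]

lemma pvScanB_D (r : List Char) (hnDY : ¬ pvKDY <+: pvKD ++ r) :
    pvScanB (pvKD ++ r) = pvVD ++ pvScanB r := by
  rw [show pvKD ++ r = 'e' :: (['m','p','t','y',' ','d','i','c','t'] ++ r) from rfl]
  rw [pvScanB]
  rw [if_neg (show (¬ pvKL <+: 'e' :: (['m','p','t','y',' ','d','i','c','t'] ++ r)) from pvNPA (k := pvKL) (w := pvKD) r (by decide) (by decide))]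
  rw [if_neg (show (¬ pvKDY <+: 'e' :: (['m','p','t','y',' ','d','i','c','t'] ++ r)) from hnDY)]
  rw [if_pos (show (pvKD <+: 'e' :: (['m','p','t','y',' ','d','i','c','t'] ++ r)) from ⟨r, rfl⟩)]
  rw [show List.drop 9 (['m','p','t','y',' ','d','i','c','t'] ++ r) = r from List.drop_left' (by rfl)]

lemma pvScanB_T (r : List Char) : pvScanB (pvKT ++ r) = pvVT ++ pvScanB r := by
  rw [show pvKT ++ r = 'e' :: (['m','p','t','y',' ','t','u','p','l','e'] ++ r) from rfl]
  rw [pvScanB]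
  rw [if_neg (show (¬ pvKL <+: 'e' :: (['m','p','t','y',' ','t','u','p','l','e'] ++ r)) from pvNPA (k := pvKL) (w := pvKT) r (by decide) (by decide))]
  rw [if_neg (show (¬ pvKDY <+: 'e' :: (['m','p','t','y',' ','t','u','p','l','e'] ++ r)) from pvNPA (k := pvKDY) (w := pvKT) r (by decide) (by decide))]
  rw [if_neg (show (¬ pvKD <+: 'e' :: (['m','p','t','y',' ','t','u','p','l','e'] ++ r)) from pvNPA (k := pvKD) (w := pvKT) r (by decide) (by decide))]
  rw [if_pos (show (pvKT <+: 'e' :: (['m','p','t','y',' ','t','u','p','l','e'] ++ r)) from ⟨r, rfl⟩)]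
  rw [show List.drop 10 (['m','p','t','y',' ','t','u','p','l','e'] ++ r) = r from List.drop_left' (by rfl)]

lemma pvScanB_SE (r : List Char) : pvScanB (pvKSE ++ r) = pvVSE ++ pvScanB r := by
  rw [show pvKSE ++ r = 'e' :: (['m','p','t','y',' ','s','e','t'] ++ r) from rfl]
  rw [pvScanB]
  rw [if_neg (show (¬ pvKL <+: 'e' :: (['m','p','t','y',' ','s','e','t'] ++ r)) from pvNPA (k := pvKL) (w := pvKSE) r (by decide) (by decide))]
  rw [if_neg (show (¬ pvKDY <+: 'e' :: (['m','p','t','y',' ','s','e','t'] ++ r)) from pvNPA (k := pvKDY) (w := pvKSE) r (by decide) (by decide))]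
  rw [if_neg (show (¬ pvKD <+: 'e' :: (['m','p','t','y',' ','s','e','t'] ++ r)) from pvNPA (k := pvKD) (w := pvKSE) r (by decide) (by decide))]
  rw [if_neg (show (¬ pvKT <+: 'e' :: (['m','p','t','y',' ','s','e','t'] ++ r)) from pvNPA (k := pvKT) (w := pvKSE) r (by decide) (by decide))]
  rw [if_pos (show (pvKSE <+: 'e' :: (['m','p','t','y',' ','s','e','t'] ++ r)) from ⟨r, rfl⟩)]
  rw [show List.drop 8 (['m','p','t','y',' ','s','e','t'] ++ r) = r from List.drop_left' (by rfl)]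

lemma pvScanB_ST (r : List Char) : pvScanB (pvKST ++ r) = pvVST ++ pvScanB r := by
  rw [show pvKST ++ r = 'e' :: (['m','p','t','y',' ','s','t','r','i','n','g'] ++ r) from rfl]
  rw [pvScanB]
  rw [if_neg (show (¬ pvKL <+: 'e' :: (['m','p','t','y',' ','s','t','r','i','n','g'] ++ r)) from pvNPA (k := pvKL) (w := pvKST) r (by decide) (by decide))]
  rw [if_neg (show (¬ pvKDY <+: 'e' :: (['m','p','t','y',' ','s','t','r','i','n','g'] ++ r)) from pvNPA (k := pvKDY) (w := pvKST) r (by decide) (by decide))]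
  rw [if_neg (show (¬ pvKD <+: 'e' :: (['m','p','t','y',' ','s','t','r','i','n','g'] ++ r)) from pvNPA (k := pvKD) (w := pvKST) r (by decide) (by decide))]
  rw [if_neg (show (¬ pvKT <+: 'e' :: (['m','p','t','y',' ','s','t','r','i','n','g'] ++ r)) from pvNPA (k := pvKT) (w := pvKST) r (by decide) (by decide))]
  rw [if_neg (show (¬ pvKSE <+: 'e' :: (['m','p','t','y',' ','s','t','r','i','n','g'] ++ r)) from pvNPA (k := pvKSE) (w := pvKST) r (by decide) (by decide))]
  rw [if_pos (show (pvKST <+: 'e' :: (['m','p','t','y',' ','s','t','r','i','n','g'] ++ r)) from ⟨r, rfl⟩)]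
  rw [show List.drop 11 (['m','p','t','y',' ','s','t','r','i','n','g'] ++ r) = r from List.drop_left' (by rfl)]

lemma pvScanB_cons (c : Char) (t : List Char)
    (h1 : ¬ pvKL <+: (c :: t)) (h2 : ¬ pvKDY <+: (c :: t)) (h3 : ¬ pvKD <+: (c :: t))
    (h4 : ¬ pvKT <+: (c :: t)) (h5 : ¬ pvKSE <+: (c :: t)) (h6 : ¬ pvKST <+: (c :: t)) :
    pvScanB (c :: t) = c :: pvScanB t := by
  rw [pvScanB]
  rw [if_neg h1, if_neg h2, if_neg h3, if_neg h4, if_neg h5, if_neg h6]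

-- a non-prefix of the tail stays a non-prefix of a processed tail behind the same head
lemma pvConsStep {a c : Char} {k' t X : List Char}
    (h : ¬ (a :: k') <+: (c :: t)) (hpres : ¬ k' <+: t → ¬ k' <+: X) :
    ¬ (a :: k') <+: (c :: X) := by
  intro hcon
  rw [List.cons_prefix_cons] at hcon
  obtain ⟨rfl, hX⟩ := hcon
  exact hpres (fun hp => h (List.cons_prefix_cons.mpr ⟨rfl, hp⟩)) hX

lemma pvMain : ∀ (n : Nat) (s : List Char), s.length ≤ n →
    ¬ pvBad1 <:+: s → ¬ pvBad2 <:+: s → pvA6 s = pvScanB s := by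
  intro n
  induction n with
  | zero =>
    intro s hl _ _
    have : s = [] := List.eq_nil_of_length_eq_zero (Nat.le_zero.mp hl)
    subst this
    simp [pvA6, pvRepl, pvScanB_nil]
  | succ n ih =>
    intro s hl hb1 hb2
    by_cases hL : pvKL <+: s
    · obtain ⟨r, rfl⟩ := hL
      have hb1' : ¬ pvBad1 <:+: r := fun h => hb1 (h.trans (List.suffix_append pvKL r).isInfix)
      have hb2' : ¬ pvBad2 <:+: r := fun h => hb2 (h.trans (List.suffix_append pvKL r).isInfix)
      have hlr : r.length ≤ n := by simp [pvKL] at hl; omega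
      unfold pvA6
      rw [pvRepl_match r (by decide)]
      rw [pvRepl_dist' (k := pvKDY) (v := pvVDY) pvVL _ (by decide)]
      rw [pvRepl_dist' (k := pvKD) (v := pvVD) pvVL _ (by decide)]
      rw [pvRepl_dist' (k := pvKT) (v := pvVT) pvVL _ (by decide)]
      rw [pvRepl_dist' (k := pvKSE) (v := pvVSE) pvVL _ (by decide)]
      rw [pvRepl_dist' (k := pvKST) (v := pvVST) pvVL _ (by decide)]
      rw [pvScanB_L r]
      rw [show pvRepl pvKST pvVST (pvRepl pvKSE pvVSE (pvRepl pvKT pvVT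
        (pvRepl pvKD pvVD (pvRepl pvKDY pvVDY (pvRepl pvKL pvVL r))))) = pvA6 r from rfl]
      rw [ih r hlr hb1' hb2']
    · by_cases hDY : pvKDY <+: s
      · obtain ⟨r, rfl⟩ := hDY
        have hb1' : ¬ pvBad1 <:+: r := fun h => hb1 (h.trans (List.suffix_append pvKDY r).isInfix)
        have hb2' : ¬ pvBad2 <:+: r := fun h => hb2 (h.trans (List.suffix_append pvKDY r).isInfix)
        have hlr : r.length ≤ n := by simp [pvKDY] at hl; omega
        unfold pvA6
        rw [pvRepl_dist' (k := pvKL) (v := pvVL) pvKDY r (by decide)]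
        rw [pvRepl_match _ (by decide)]
        rw [pvRepl_dist' (k := pvKD) (v := pvVD) pvVDY _ (by decide)]
        rw [pvRepl_dist' (k := pvKT) (v := pvVT) pvVDY _ (by decide)]
        rw [pvRepl_dist' (k := pvKSE) (v := pvVSE) pvVDY _ (by decide)]
        rw [pvRepl_dist' (k := pvKST) (v := pvVST) pvVDY _ (by decide)]
        rw [pvScanB_DY r]
        rw [show pvRepl pvKST pvVST (pvRepl pvKSE pvVSE (pvRepl pvKT pvVT
          (pvRepl pvKD pvVD (pvRepl pvKDY pvVDY (pvRepl pvKL pvVL r))))) = pvA6 r from rfl]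
        rw [ih r hlr hb1' hb2']
      · by_cases hD : pvKD <+: s
        · obtain ⟨r, rfl⟩ := hD
          have hb1' : ¬ pvBad1 <:+: r := fun h => hb1 (h.trans (List.suffix_append pvKD r).isInfix)
          have hb2' : ¬ pvBad2 <:+: r := fun h => hb2 (h.trans (List.suffix_append pvKD r).isInfix)
          have hlr : r.length ≤ n := by simp [pvKD] at hl; omega
          have hion : ¬ (['i','o','n','a','r','y'] <+: r) := by
            intro h
            obtain ⟨q, rfl⟩ := h
            exact hDY ⟨q, rfl⟩
          have hion1 : ¬ (['i','o','n','a','r','y'] <+: pvRepl pvKL pvVL r) :=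
            pvRepl_pres pvKL pvVL r.length r _ le_rfl (by decide) hion
          have hnm : ∀ j, j < pvKD.length → ¬ pvKDY <+: (pvKD.drop j ++ pvRepl pvKL pvVL r) := by
            intro j hj
            match j with
            | 0 =>
              intro hcon
              apply hion1
              obtain ⟨q, hq⟩ := hcon
              exact ⟨q, List.append_cancel_left
                (show pvKD ++ (['i','o','n','a','r','y'] ++ q) = pvKD ++ pvRepl pvKL pvVL r from hq)⟩
            | (j + 1) =>
              have hstr : ∀ i, i < pvKD.length → 1 ≤ i →
                  ¬ (pvKDY <+: pvKD.drop i) ∧ ¬ (pvKD.drop i <+: pvKDY) := by decide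
              intro hcon
              rcases pvPrefixSplit hcon with h1 | h2
              · exact (hstr (j+1) hj (by omega)).1 h1
              · exact (hstr (j+1) hj (by omega)).2 h2
          have hnDY2 : ¬ pvKDY <+: pvKD ++ r := by
            intro h
            apply hion
            obtain ⟨q, hq⟩ := h
            exact ⟨q, List.append_cancel_left
              (show pvKD ++ (['i','o','n','a','r','y'] ++ q) = pvKD ++ r from hq)⟩
          unfold pvA6
          rw [pvRepl_dist' (k := pvKL) (v := pvVL) pvKD r (by decide)]
          rw [pvRepl_dist (k := pvKDY) (v := pvVDY) pvKD _ hnm]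
          rw [pvRepl_match _ (by decide)]
          rw [pvRepl_dist' (k := pvKT) (v := pvVT) pvVD _ (by decide)]
          rw [pvRepl_dist' (k := pvKSE) (v := pvVSE) pvVD _ (by decide)]
          rw [pvRepl_dist' (k := pvKST) (v := pvVST) pvVD _ (by decide)]
          rw [pvScanB_D r hnDY2]
          rw [show pvRepl pvKST pvVST (pvRepl pvKSE pvVSE (pvRepl pvKT pvVT
            (pvRepl pvKD pvVD (pvRepl pvKDY pvVDY (pvRepl pvKL pvVL r))))) = pvA6 r from rfl]
          rw [ih r hlr hb1' hb2']
        · by_cases hT : pvKT <+: s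
          · obtain ⟨r, rfl⟩ := hT
            have hb1' : ¬ pvBad1 <:+: r := fun h => hb1 (h.trans (List.suffix_append pvKT r).isInfix)
            have hb2' : ¬ pvBad2 <:+: r := fun h => hb2 (h.trans (List.suffix_append pvKT r).isInfix)
            have hlr : r.length ≤ n := by simp [pvKT] at hl; omega
            have hml : ¬ (['m','p','t','y',' ','l','i','s','t'] <+: r) := by
              intro h
              obtain ⟨q, rfl⟩ := h
              exact hb1 (List.IsPrefix.isInfix ⟨q, rfl⟩)
            have hmd : ¬ (['m','p','t','y',' ','d','i','c','t'] <+: r) := by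
              intro h
              obtain ⟨q, rfl⟩ := h
              exact hb2 (List.IsPrefix.isInfix ⟨q, rfl⟩)
            have hmdy : ¬ (['m','p','t','y',' ','d','i','c','t','i','o','n','a','r','y'] <+: r) :=
              fun h => hmd ((by decide :
                (['m','p','t','y',' ','d','i','c','t'] : List Char) <+:
                  ['m','p','t','y',' ','d','i','c','t','i','o','n','a','r','y']).trans h)
            have hmdy1 : ¬ (['m','p','t','y',' ','d','i','c','t','i','o','n','a','r','y'] <+: pvRepl pvKL pvVL r) :=
              pvRepl_pres pvKL pvVL r.length r _ le_rfl (by decide) hmdy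
            have hmd2 : ¬ (['m','p','t','y',' ','d','i','c','t'] <+: pvRepl pvKDY pvVDY (pvRepl pvKL pvVL r)) := by
              refine pvRepl_pres pvKDY pvVDY _ _ _ le_rfl (by decide) ?_
              exact pvRepl_pres pvKL pvVL r.length r _ le_rfl (by decide) hmd
            have hnmT : ∀ (k' : List Char) (x : List Char), ¬ (k'.drop 1 <+: x) →
                (∀ i, i < pvKT.length → 1 ≤ i → i ≠ 10 → ¬ (k' <+: pvKT.drop i) ∧ ¬ (pvKT.drop i <+: k')) →
                ¬ (k' <+: pvKT) → ¬ (pvKT <+: k') →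
                (k' = 'e' :: k'.drop 1) →
                ∀ j, j < pvKT.length → ¬ k' <+: (pvKT.drop j ++ x) := by
              intro k' x htail hstr h0a h0b hcons j hj
              by_cases hj0 : j = 0
              · subst hj0; exact pvNPA x h0a h0b
              · by_cases hj10 : j = 10
                · subst hj10
                  intro hcon
                  rw [show pvKT.drop 10 ++ x = 'e' :: x from rfl] at hcon
                  rw [hcons, List.cons_prefix_cons] at hcon
                  exact htail hcon.2
                · intro hcon
                  rcases pvPrefixSplit hcon with h1 | h2
                  · exact (hstr j hj (by omega) hj10).1 h1
                  · exact (hstr j hj (by omega) hj10).2 h2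
            unfold pvA6
            rw [pvRepl_dist (k := pvKL) (v := pvVL) pvKT r
              (hnmT pvKL r hml (by decide) (by decide) (by decide) (by decide))]
            rw [pvRepl_dist (k := pvKDY) (v := pvVDY) pvKT _
              (hnmT pvKDY _ hmdy1 (by decide) (by decide) (by decide) (by decide))]
            rw [pvRepl_dist (k := pvKD) (v := pvVD) pvKT _
              (hnmT pvKD _ hmd2 (by decide) (by decide) (by decide) (by decide))]
            rw [pvRepl_match _ (by decide)]
            rw [pvRepl_dist' (k := pvKSE) (v := pvVSE) pvVT _ (by decide)]
            rw [pvRepl_dist' (k := pvKST) (v := pvVST) pvVT _ (by decide)]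
            rw [pvScanB_T r]
            rw [show pvRepl pvKST pvVST (pvRepl pvKSE pvVSE (pvRepl pvKT pvVT
              (pvRepl pvKD pvVD (pvRepl pvKDY pvVDY (pvRepl pvKL pvVL r))))) = pvA6 r from rfl]
            rw [ih r hlr hb1' hb2']
          · by_cases hSE : pvKSE <+: s
            · obtain ⟨r, rfl⟩ := hSE
              have hb1' : ¬ pvBad1 <:+: r := fun h => hb1 (h.trans (List.suffix_append pvKSE r).isInfix)
              have hb2' : ¬ pvBad2 <:+: r := fun h => hb2 (h.trans (List.suffix_append pvKSE r).isInfix)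
              have hlr : r.length ≤ n := by simp [pvKSE] at hl; omega
              unfold pvA6
              rw [pvRepl_dist' (k := pvKL) (v := pvVL) pvKSE r (by decide)]
              rw [pvRepl_dist' (k := pvKDY) (v := pvVDY) pvKSE _ (by decide)]
              rw [pvRepl_dist' (k := pvKD) (v := pvVD) pvKSE _ (by decide)]
              rw [pvRepl_dist' (k := pvKT) (v := pvVT) pvKSE _ (by decide)]
              rw [pvRepl_match _ (by decide)]
              rw [pvRepl_dist' (k := pvKST) (v := pvVST) pvVSE _ (by decide)]
              rw [pvScanB_SE r]
              rw [show pvRepl pvKST pvVST (pvRepl pvKSE pvVSE (pvRepl pvKT pvVT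
                (pvRepl pvKD pvVD (pvRepl pvKDY pvVDY (pvRepl pvKL pvVL r))))) = pvA6 r from rfl]
              rw [ih r hlr hb1' hb2']
            · by_cases hST : pvKST <+: s
              · obtain ⟨r, rfl⟩ := hST
                have hb1' : ¬ pvBad1 <:+: r := fun h => hb1 (h.trans (List.suffix_append pvKST r).isInfix)
                have hb2' : ¬ pvBad2 <:+: r := fun h => hb2 (h.trans (List.suffix_append pvKST r).isInfix)
                have hlr : r.length ≤ n := by simp [pvKST] at hl; omega
                unfold pvA6
                rw [pvRepl_dist' (k := pvKL) (v := pvVL) pvKST r (by decide)]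
                rw [pvRepl_dist' (k := pvKDY) (v := pvVDY) pvKST _ (by decide)]
                rw [pvRepl_dist' (k := pvKD) (v := pvVD) pvKST _ (by decide)]
                rw [pvRepl_dist' (k := pvKT) (v := pvVT) pvKST _ (by decide)]
                rw [pvRepl_dist' (k := pvKSE) (v := pvVSE) pvKST _ (by decide)]
                rw [pvRepl_match _ (by decide)]
                rw [pvScanB_ST r]
                rw [show pvRepl pvKST pvVST (pvRepl pvKSE pvVSE (pvRepl pvKT pvVT
                  (pvRepl pvKD pvVD (pvRepl pvKDY pvVDY (pvRepl pvKL pvVL r))))) = pvA6 r from rfl]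
                rw [ih r hlr hb1' hb2']
              · cases s with
                | nil => simp [pvA6, pvRepl, pvScanB_nil]
                | cons c t =>
                  have hb1' : ¬ pvBad1 <:+: t := fun h => hb1 (h.trans (List.suffix_cons c t).isInfix)
                  have hb2' : ¬ pvBad2 <:+: t := fun h => hb2 (h.trans (List.suffix_cons c t).isInfix)
                  have hlt : t.length ≤ n := by simp at hl; omega
                  have hDY2 : ¬ pvKDY <+: c :: pvRepl pvKL pvVL t :=
                    pvConsStep hDY (fun hp => pvRepl_pres pvKL pvVL t.length t _ le_rfl (by decide) hp)
                  have hD2 : ¬ pvKD <+: c :: pvRepl pvKDY pvVDY (pvRepl pvKL pvVL t) :=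
                    pvConsStep hD (fun hp =>
                      pvRepl_pres pvKDY pvVDY _ _ _ le_rfl (by decide)
                        (pvRepl_pres pvKL pvVL t.length t _ le_rfl (by decide) hp))
                  have hT2 : ¬ pvKT <+: c :: pvRepl pvKD pvVD (pvRepl pvKDY pvVDY (pvRepl pvKL pvVL t)) :=
                    pvConsStep hT (fun hp =>
                      pvRepl_pres pvKD pvVD _ _ _ le_rfl (by decide)
                        (pvRepl_pres pvKDY pvVDY _ _ _ le_rfl (by decide)
                          (pvRepl_pres pvKL pvVL t.length t _ le_rfl (by decide) hp)))
                  have hSE2 : ¬ pvKSE <+: c :: pvRepl pvKT pvVT (pvRepl pvKD pvVD (pvRepl pvKDY pvVDY (pvRepl pvKL pvVL t))) :=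
                    pvConsStep hSE (fun hp =>
                      pvRepl_pres pvKT pvVT _ _ _ le_rfl (by decide)
                        (pvRepl_pres pvKD pvVD _ _ _ le_rfl (by decide)
                          (pvRepl_pres pvKDY pvVDY _ _ _ le_rfl (by decide)
                            (pvRepl_pres pvKL pvVL t.length t _ le_rfl (by decide) hp))))
                  have hST2 : ¬ pvKST <+: c :: pvRepl pvKSE pvVSE (pvRepl pvKT pvVT (pvRepl pvKD pvVD (pvRepl pvKDY pvVDY (pvRepl pvKL pvVL t)))) :=
                    pvConsStep hST (fun hp =>
                      pvRepl_pres pvKSE pvVSE _ _ _ le_rfl (by decide)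
                        (pvRepl_pres pvKT pvVT _ _ _ le_rfl (by decide)
                          (pvRepl_pres pvKD pvVD _ _ _ le_rfl (by decide)
                            (pvRepl_pres pvKDY pvVDY _ _ _ le_rfl (by decide)
                              (pvRepl_pres pvKL pvVL t.length t _ le_rfl (by decide) hp)))))
                  unfold pvA6
                  rw [pvRepl_cons hL, pvRepl_cons hDY2, pvRepl_cons hD2,
                      pvRepl_cons hT2, pvRepl_cons hSE2, pvRepl_cons hST2]
                  rw [pvScanB_cons c t hL hDY hD hT hSE hST]
                  rw [show pvRepl pvKST pvVST (pvRepl pvKSE pvVSE (pvRepl pvKT pvVT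
                    (pvRepl pvKD pvVD (pvRepl pvKDY pvVDY (pvRepl pvKL pvVL t))))) = pvA6 t from rfl]
                  rw [ih t hlt hb1' hb2']

-- bridge: PySem's fuel-based replace loop computes pvRepl
lemma pvRepl_go (k v : List Char) (hk : k ≠ []) : ∀ (fuel : Nat) (l acc : List Char),
    l.length ≤ fuel → PySem.Chars.replace.go k v fuel l acc = acc.reverse ++ pvRepl k v l := by
  intro fuel
  induction fuel with
  | zero =>
    intro l acc h
    have : l = [] := List.eq_nil_of_length_eq_zero (Nat.le_zero.mp h)
    subst this
    rw [PySem.Chars.replace.go, pvRepl]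
  | succ n ih =>
    intro l acc h
    cases l with
    | nil =>
      rw [PySem.Chars.replace.go, pvRepl] <;> simp
    | cons c t =>
      obtain ⟨a, k', rfl⟩ := List.exists_cons_of_ne_nil hk
      rw [PySem.Chars.replace.go]
      by_cases hp : (a :: k') <+: (c :: t)
      · rw [if_pos (List.isPrefixOf_iff_prefix.mpr hp)]
        rw [show List.drop (a :: k').length (c :: t) = List.drop k'.length t from List.drop_succ_cons ..]
        rw [ih _ _ (by simp at h ⊢; omega)]
        rw [pvRepl, if_pos hp]
        simp
      · rw [if_neg (by simpa using (fun hb => hp (List.isPrefixOf_iff_prefix.mp hb)))]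
        rw [ih _ _ (by simp at h ⊢; omega)]
        rw [pvRepl_cons hp]
        simp

lemma pvReplaceEq {k : List Char} (v t : List Char) (hk : k ≠ []) :
    PySem.Chars.replace t k v = pvRepl k v t := by
  rw [PySem.Chars.replace]
  rw [if_neg (by simpa using hk)]
  rw [pvRepl_go k v hk t.length t [] le_rfl]
  simp

lemma pvStep (k v t : String) (hk : k.toList ≠ []) :
    (if PySem.Str.isIn k t then PySem.Str.replace t k v else t).toList
      = pvRepl k.toList v.toList t.toList := by
  by_cases h : PySem.Str.isIn k t
  · rw [if_pos h, PySem.Str.toList_replace, pvReplaceEq _ _ hk]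
  · rw [if_neg h]
    have hni : ¬ k.toList <:+: t.toList := fun hi => h ((PySem.Str.isIn_iff_infix _ _).mpr hi)
    exact (pvRepl_id hni).symm

-- ===== VERDICT (by name: the statement is the Claim_ definition above) =====
theorem process_empty_py_spec : Claim_equal_process_empty_py := by
  unfold Claim_equal_process_empty_py
  intro text _ hpre
  unfold Spec_process_empty_py
  obtain ⟨h1, h2⟩ := hpre
  have hb1 : ¬ pvBad1 <:+: text.toList := by
    intro hi
    have ht : PySem.Str.isIn "empty tuplempty list" text = true :=
      (PySem.Str.isIn_iff_infix _ _).mpr hi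
    rw [h1] at ht
    exact Bool.noConfusion ht
  have hb2 : ¬ pvBad2 <:+: text.toList := by
    intro hi
    have ht : PySem.Str.isIn "empty tuplempty dict" text = true :=
      (PySem.Str.isIn_iff_infix _ _).mpr hi
    rw [h2] at ht
    exact Bool.noConfusion ht
  have hA : (process_empty_py text).toList = pvA6 text.toList := by
    unfold process_empty_py pvEmptyMap
    simp only [List.foldl_cons, List.foldl_nil]
    rw [pvStep _ _ _ (by decide), pvStep _ _ _ (by decide), pvStep _ _ _ (by decide),
        pvStep _ _ _ (by decide), pvStep _ _ _ (by decide), pvStep _ _ _ (by decide)]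
    rfl
  have hB : (process_empty_py_alt text).toList = pvScanB text.toList := by
    unfold process_empty_py_alt
    rw [String.toList_ofList]
  have hlist : (process_empty_py text).toList = (process_empty_py_alt text).toList := by
    rw [hA, hB, pvMain text.toList.length text.toList le_rfl hb1 hb2]
  exact String.toList_inj.mp hlist
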